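-- pv_equiv track=rewrite | github.com/riteshshrv/OJs_mySolution | ib/ib_is_number.py | isNumberWithoutE
-- ===== SOURCE A (Python) =====
-- def isNumberWithoutE(s, decimalAllow = True):
--     ''' Check whether s is a number not in scientific notation
--     '''
--     digits = "1234567890"
--
--     sLen = len(s)
--     if sLen == 0:               return False
--
--     if s[0] == "+" or s[0] == "-":
--         # Skip the sign
--         s = s[1:]; sLen -= 1
--         if sLen == 0:           return False
--
--
--     if "." in s:
--         if sLen == 1 or not decimalAllow:   return False
--
--         decimalPoint = s.index(".")
--         if (len(s[decimalPoint+1:])==0):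
--             return False
--         for item in s[:decimalPoint] + s[decimalPoint+1:]:
--             if not item in digits:          return False
--         else:
--             # All elements are digits (except one decimal point)
--             return True
--     else:
--         for item in s:
--             if not item in digits:          return False
--         else:
--             # All elements are digits
--             return True
-- ===== SOURCE B (Python) =====
-- def isNumberWithoutE(s, decimalAllow=True):
--     ''' Check whether s is a number not in scientific notation
--         (single left-to-right DFA pass; no slicing, no index search)
--         states: 0 start, 1 after sign, 2 in integer digits,
--                 3 just after the dot (a digit is required), 4 in fraction digits
--     '''
--     state = 0
--     for c in s:
--         if c in "0123456789":
--             if state == 0 or state == 1: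
--                 state = 2
--             elif state == 3:
--                 state = 4
--             # states 2 and 4 absorb digits
--         elif (c == "+" or c == "-") and state == 0:
--             state = 1
--         elif c == "." and decimalAllow and (state == 0 or state == 1 or state == 2):
--             state = 3
--         else:
--             return False
--     return state == 2 or state == 4
-- ===== Notes on version B (the rewrite author's own statement) =====
-- stated objective: alternative
-- what changed: Replaced A's sign-stripping, dot-index search and slice-concatenation passes with a single left-to-right five-state DFA pass over the characters (no slicing, no index(), no string rebuilding).
import Mathlib
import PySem

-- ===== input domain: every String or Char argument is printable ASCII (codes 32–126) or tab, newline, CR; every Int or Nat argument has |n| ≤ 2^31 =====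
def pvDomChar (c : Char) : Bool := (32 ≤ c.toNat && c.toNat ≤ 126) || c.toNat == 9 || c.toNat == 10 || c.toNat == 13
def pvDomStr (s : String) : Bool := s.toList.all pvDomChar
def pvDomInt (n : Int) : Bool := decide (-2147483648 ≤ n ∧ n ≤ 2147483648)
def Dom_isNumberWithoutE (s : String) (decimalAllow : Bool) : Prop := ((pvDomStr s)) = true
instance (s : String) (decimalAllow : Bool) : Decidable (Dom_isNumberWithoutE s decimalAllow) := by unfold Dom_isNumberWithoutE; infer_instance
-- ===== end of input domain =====

-- B replaces A's sign-stripping / dot-index / slicing passes with one left-to-right DFA pass (alternative algorithm, same cost).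

-- ===== PORT A =====
-- literal transliteration of A on s.toList; s[1:] = drop 1, s[:dp] = take dp, s[dp+1:] = drop (dp+1)
-- (nonnegative in-range slices, exact); s.index('.') = idxOf, exact here since '.' ∈ cs in that branch;
-- s[0] = headI, guarded by the emptiness check; the early-return-all loops are .all.
def isNumberWithoutE (s : String) (decimalAllow : Bool) : Bool :=
  let digits := "1234567890".toList
  let cs := s.toList
  if cs.length = 0 then false
  else
    let cs := if cs.headI = '+' ∨ cs.headI = '-' then cs.drop 1 else cs
    if cs.length = 0 then false
    else if cs.contains '.' then
      if cs.length = 1 ∨ decimalAllow = false then false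
      else
        let dp := cs.idxOf '.'
        if (cs.drop (dp + 1)).length = 0 then false
        else (cs.take dp ++ cs.drop (dp + 1)).all (fun c => digits.contains c)
    else cs.all (fun c => digits.contains c)

-- ===== PORT B =====
-- the DFA loop of Source B: states 0 start, 1 after sign, 2 integer digits, 3 just after dot, 4 fraction digits
def pvDfa (decimalAllow : Bool) : List Char → Nat → Bool
  | [], st => st == 2 || st == 4
  | c :: r, st =>
    if ("0123456789".toList).contains c then
      pvDfa decimalAllow r (if st = 0 ∨ st = 1 then 2 else if st = 3 then 4 else st)
    else if (c = '+' ∨ c = '-') ∧ st = 0 then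
      pvDfa decimalAllow r 1
    else if c = '.' ∧ decimalAllow = true ∧ (st = 0 ∨ st = 1 ∨ st = 2) then
      pvDfa decimalAllow r 3
    else false

def isNumberWithoutE_alt (s : String) (decimalAllow : Bool) : Bool :=
  pvDfa decimalAllow s.toList 0

-- ===== PRECONDITION & SPEC =====
def Spec_isNumberWithoutE (s : String) (decimalAllow : Bool) (out : Bool) : Prop := out = isNumberWithoutE_alt s decimalAllow
instance (s : String) (decimalAllow : Bool) (out : Bool) : Decidable (Spec_isNumberWithoutE s decimalAllow out) := by unfold Spec_isNumberWithoutE; infer_instance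

-- ===== CLAIM (what is proved, stated in full; the proofs are below) =====
def Claim_equal_isNumberWithoutE : Prop := ∀ (s : String) (decimalAllow : Bool), Dom_isNumberWithoutE s decimalAllow → Spec_isNumberWithoutE s decimalAllow (isNumberWithoutE s decimalAllow)

-- ===== LEMMAS AND PROOFS =====

def dig (c : Char) : Bool := ("1234567890".toList).contains c

-- the common specification of the post-sign part: digits, optionally one dot with a nonempty all-digit fraction
def spec2 (d : Bool) (cs : List Char) : Bool :=
  if cs.contains '.' then
    d && (cs.take (cs.idxOf '.')).all dig
      && !((cs.drop (cs.idxOf '.' + 1)).isEmpty)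
      && (cs.drop (cs.idxOf '.' + 1)).all dig
  else cs.all dig

theorem dig0_eq (c : Char) : ("0123456789".toList).contains c = dig c := by
  unfold dig
  rw [Bool.eq_iff_iff, List.contains_iff_mem, List.contains_iff_mem]
  exact (show ("0123456789".toList).Perm ("1234567890".toList) by decide).mem_iff

theorem dig_ne_dot {c : Char} (h : dig c = true) : c ≠ '.' := by
  intro he; subst he; exact absurd h (by decide)

theorem dig_ne_sign {c : Char} (h : dig c = true) : ¬(c = '+' ∨ c = '-') := by
  rintro (he | he) <;> subst he <;> exact absurd h (by decide)

theorem spec2_cons_digit (d : Bool) {c : Char} (r : List Char) (h : dig c = true) :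
    spec2 d (c :: r) = spec2 d r := by
  have hne := dig_ne_dot h
  unfold spec2
  by_cases hm : r.contains '.'
  · have : (c :: r).contains '.' = true := by
      simp [List.contains_eq_mem] at hm ⊢; exact Or.inr hm
    rw [if_pos this, if_pos hm, List.idxOf_cons_ne _ hne]
    simp [h, List.all_cons]
  · rw [if_neg (by simp [List.contains_eq_mem] at hm ⊢; exact ⟨fun h => hne h.symm, by simpa using hm⟩),
      if_neg (by simpa using hm)]
    simp [List.all_cons, h]

theorem spec2_cons_dot (d : Bool) (r : List Char) :
    spec2 d ('.' :: r) = (d && !r.isEmpty && r.all dig) := by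
  unfold spec2
  rw [if_pos (by simp [List.contains_eq_mem])]
  simp [List.idxOf_cons_self, Bool.and_assoc]

theorem spec2_cons_other (d : Bool) {c : Char} (r : List Char)
    (hd : dig c = false) (hne : c ≠ '.') :
    spec2 d (c :: r) = false := by
  unfold spec2
  by_cases hm : r.contains '.'
  · rw [if_pos (by simp [List.contains_eq_mem] at hm ⊢; exact Or.inr hm),
      List.idxOf_cons_ne _ hne]
    simp [List.all_cons, hd]
  · rw [if_neg (by simp [List.contains_eq_mem] at hm ⊢; exact ⟨fun h => hne h.symm, by simpa using hm⟩)]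
    simp [List.all_cons, hd]

theorem pvDfa_four (d : Bool) (cs : List Char) : pvDfa d cs 4 = cs.all dig := by
  induction cs with
  | nil => rfl
  | cons c r ih =>
    rw [pvDfa, dig0_eq]
    by_cases h : dig c = true
    · simp [h, ih]
    · simp at h
      have h1 := dig_ne_dot (c := c)
      have h2 := dig_ne_sign (c := c)
      simp [h, List.all_cons]

theorem pvDfa_three (d : Bool) (cs : List Char) :
    pvDfa d cs 3 = (!cs.isEmpty && cs.all dig) := by
  cases cs with
  | nil => rfl
  | cons c r =>
    rw [pvDfa, dig0_eq]
    by_cases h : dig c = true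
    · simp [h, pvDfa_four, List.all_cons]
    · simp at h
      simp [h, List.all_cons]

theorem pvDfa_two (d : Bool) (cs : List Char) : pvDfa d cs 2 = spec2 d cs := by
  induction cs with
  | nil => rfl
  | cons c r ih =>
    rw [pvDfa, dig0_eq]
    by_cases h : dig c = true
    · simp [h, ih, spec2_cons_digit d r h]
    · simp at h
      by_cases hdot : c = '.'
      · subst hdot
        by_cases hd : d = true
        · simp [h, hd, pvDfa_three, spec2_cons_dot]
        · simp at hd
          simp [h, hd, spec2_cons_dot]
      · simp [h, hdot, spec2_cons_other d r h hdot]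

theorem pvDfa_one (d : Bool) (cs : List Char) :
    pvDfa d cs 1 = (!cs.isEmpty && spec2 d cs) := by
  cases cs with
  | nil => rfl
  | cons c r =>
    have step : pvDfa d (c :: r) 1 = pvDfa d (c :: r) 2 := by
      rw [pvDfa, pvDfa]
      by_cases h : ("0123456789".toList).contains c = true
      · simp [h]
      · simp at h
        simp [h]
    rw [step, pvDfa_two]
    simp

-- A's post-sign body equals spec2
theorem acore_eq (d : Bool) (cs : List Char) (hne : cs ≠ []) :
    (if cs.contains '.' then
      if cs.length = 1 ∨ d = false then false
      else
        if (cs.drop (cs.idxOf '.' + 1)).length = 0 then false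
        else (cs.take (cs.idxOf '.') ++ cs.drop (cs.idxOf '.' + 1)).all
          (fun c => ("1234567890".toList).contains c)
    else cs.all (fun c => ("1234567890".toList).contains c)) = spec2 d cs := by
  have he : (fun c => ("1234567890".toList).contains c) = dig := rfl
  rw [he]
  by_cases hm : cs.contains '.'
  · rw [if_pos hm]
    unfold spec2
    rw [if_pos hm]
    by_cases hd : d = true
    · by_cases h1 : cs.length = 1
      · -- cs = ['.']
        have : cs = ['.'] := by
          match cs, h1 with
          | [a], _ =>
            have ha : a = '.' := by
              have h' := (List.contains_iff_mem).mp hm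
              simpa [eq_comm] using h'
            simp [ha]
        subst this
        simp [hd]
      · rw [if_neg (by simp [h1, hd])]
        by_cases h2 : (cs.drop (cs.idxOf '.' + 1)).length = 0
        · have h0 : List.drop (cs.idxOf '.' + 1) cs = [] := List.length_eq_zero_iff.mp h2
          simp [hd, h0]
        · rw [if_neg h2]
          have hie : (List.drop (cs.idxOf '.' + 1) cs).isEmpty = false := by
            cases hl : List.drop (cs.idxOf '.' + 1) cs with
            | nil => exact absurd (by simp [hl]) h2
            | cons a t => rfl
          simp [hd, List.all_append, hie]
    · simp at hd
      simp [hd]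
  · rw [if_neg hm]
    unfold spec2
    rw [if_neg hm]

-- the common shape of both programs: optional sign, then the post-sign specification
def specTop (d : Bool) (cs : List Char) : Bool :=
  match cs with
  | [] => false
  | c :: r => if c = '+' ∨ c = '-' then (!r.isEmpty && spec2 d r) else spec2 d (c :: r)

theorem a_eq_specTop (s : String) (d : Bool) :
    isNumberWithoutE s d = specTop d s.toList := by
  unfold isNumberWithoutE
  cases hcs : s.toList with
  | nil => rfl
  | cons c r =>
    simp only [List.length_cons, List.headI, List.drop_succ_cons, List.drop_zero, specTop]
    rw [if_neg (by omega)]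
    by_cases hs : c = '+' ∨ c = '-'
    · rw [if_pos hs, if_pos hs]
      cases r with
      | nil => simp
      | cons c' r' =>
        rw [if_neg (by simp), acore_eq d (c' :: r') (by simp)]
        simp
    · rw [if_neg hs, if_neg hs, if_neg (by simp), acore_eq d (c :: r) (by simp)]

theorem b_eq_specTop (s : String) (d : Bool) :
    isNumberWithoutE_alt s d = specTop d s.toList := by
  unfold isNumberWithoutE_alt
  cases hcs : s.toList with
  | nil => rfl
  | cons c r =>
    rw [pvDfa, dig0_eq, specTop]
    by_cases h : dig c = true
    · rw [if_pos h,
        show (if (0:Nat) = 0 ∨ (0:Nat) = 1 then (2:Nat) else if (0:Nat) = 3 then 4 else 0) = 2 from rfl,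
        pvDfa_two, if_neg (dig_ne_sign h), spec2_cons_digit d r h]
    · rw [if_neg (by simp [h])]
      by_cases hs : c = '+' ∨ c = '-'
      · rw [if_pos (show (c = '+' ∨ c = '-') ∧ (0:Nat) = 0 from ⟨hs, rfl⟩), pvDfa_one, if_pos hs]
      · rw [if_neg (fun hc => hs hc.1), if_neg hs]
        by_cases hdot : c = '.'
        · subst hdot
          by_cases hdal : d = true
          · rw [if_pos (show ('.' : Char) = '.' ∧ d = true ∧ ((0:Nat) = 0 ∨ (0:Nat) = 1 ∨ (0:Nat) = 2)
                from ⟨rfl, hdal, Or.inl rfl⟩), pvDfa_three, spec2_cons_dot]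
            simp [hdal]
          · simp only [Bool.not_eq_true] at hdal
            rw [if_neg (by simp [hdal]), spec2_cons_dot]
            simp [hdal]
        · rw [if_neg (fun hc => hdot hc.1), spec2_cons_other d r (by simpa using h) hdot]

-- ===== VERDICT (by name: the statement is the Claim_ definition above) =====
theorem isNumberWithoutE_spec : Claim_equal_isNumberWithoutE := by
  intro s d _
  unfold Spec_isNumberWithoutE
  rw [a_eq_specTop, b_eq_specTop]
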